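-- pv_equiv track=rewrite | github.com/GTP-Git/Scrabble2 | scrabble_helpers.py | get_anchor_points
-- ===== SOURCE A (Python) =====
-- GRID_SIZE = 15
--
-- CENTER_SQUARE = (7, 7)
--
-- def get_anchor_points(tiles, is_first_play):
--     """Get anchor points (empty squares adjacent to existing tiles) for valid moves."""
--     anchors = set()
--     if is_first_play: anchors.add(CENTER_SQUARE); return anchors
--     has_tiles = False
--     for r in range(GRID_SIZE):
--         for c in range(GRID_SIZE):
--             if tiles[r][c]: has_tiles = True # Check if board has any tiles
--             if not tiles[r][c]: # Must be an empty square
--                  is_anchor = False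
--                  for dr, dc in [(-1, 0), (1, 0), (0, -1), (0, 1)]:
--                      nr, nc = r + dr, c + dc
--                      if 0 <= nr < GRID_SIZE and 0 <= nc < GRID_SIZE and tiles[nr][nc]: is_anchor = True; break
--                  if is_anchor: anchors.add((r, c))
--     if not has_tiles and not is_first_play: anchors.add(CENTER_SQUARE) # Fallback if board empty but not first play
--     return anchors
-- ===== SOURCE B (Python) =====
-- GRID_SIZE = 15
--
-- CENTER_SQUARE = (7, 7)
--
-- def get_anchor_points(tiles, is_first_play):
--     """Get anchor points (empty squares adjacent to existing tiles) for valid moves."""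
--     if is_first_play:
--         return {CENTER_SQUARE}
--     filled = [(r, c) for r in range(GRID_SIZE) for c in range(GRID_SIZE) if tiles[r][c]]
--     nbrs = set()
--     for r, c in filled:
--         for p in ((r - 1, c), (r + 1, c), (r, c - 1), (r, c + 1)):
--             if 0 <= p[0] < GRID_SIZE and 0 <= p[1] < GRID_SIZE:
--                 nbrs.add(p)
--     anchors = {(r, c) for r in range(GRID_SIZE) for c in range(GRID_SIZE)
--                if not tiles[r][c] and (r, c) in nbrs}
--     if not filled:
--         anchors.add(CENTER_SQUARE)
--     return anchors
-- ===== Notes on version B (the rewrite author's own statement) =====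
-- stated objective: alternative
-- what changed: B dilates the set of filled cells into a precomputed neighbour set and intersects it with the empty cells, instead of A's per-empty-cell inner scan of the four neighbours with break; the empty-board center fallback is driven by the filled list being empty.
-- outside the precondition, e.g. on get_anchor_points([], False): A raises IndexError, B raises IndexError
import Mathlib
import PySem

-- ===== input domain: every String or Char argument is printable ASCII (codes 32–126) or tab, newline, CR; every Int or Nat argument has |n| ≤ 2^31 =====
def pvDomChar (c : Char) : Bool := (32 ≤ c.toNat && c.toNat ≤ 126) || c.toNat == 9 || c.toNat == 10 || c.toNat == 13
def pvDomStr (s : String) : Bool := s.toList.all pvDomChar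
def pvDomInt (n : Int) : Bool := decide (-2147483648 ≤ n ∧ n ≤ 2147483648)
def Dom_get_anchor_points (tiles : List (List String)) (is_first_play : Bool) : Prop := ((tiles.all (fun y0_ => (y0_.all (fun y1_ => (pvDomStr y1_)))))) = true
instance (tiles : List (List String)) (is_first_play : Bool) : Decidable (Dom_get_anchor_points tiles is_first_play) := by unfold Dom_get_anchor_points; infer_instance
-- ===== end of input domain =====

-- B replaces A's per-empty-cell scan of the four neighbours by one dilation pass over the
-- filled cells followed by a membership filter over the empty cells (objective: alternative).

-- ===== PORT A =====
-- truthiness of tiles[r][c] (nonempty string); default [] / "" never reached under Pre_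
def gapCell (tiles : List (List String)) (r c : Int) : Bool :=
  !((PySem.List.pyGetD (PySem.List.pyGetD tiles r []) c "") == "")

-- in-bounds test 0 <= x < GRID_SIZE and 0 <= y < GRID_SIZE
def gapInb (q : Int × Int) : Bool :=
  decide (0 ≤ q.1) && decide (q.1 < 15) && decide (0 ≤ q.2) && decide (q.2 < 15)

-- A's inner 'for dr, dc in …: … break' loop: first-hit scan of the direction list
def gapNeigh (tiles : List (List String)) (r c : Int) : List (Int × Int) → Bool
  | [] => false
  | (dr, dc) :: rest =>
    if gapInb (r + dr, c + dc) && gapCell tiles (r + dr) (c + dc) then true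
    else gapNeigh tiles r c rest

def get_anchor_points (tiles : List (List String)) (is_first_play : Bool) : List (Int × Int) :=
  let anchors : PySem.Set (Int × Int) := PySem.Set.empty
  if is_first_play then PySem.Set.add anchors (7, 7)
  else
    let st :=
      (PySem.List.pyRange 0 15 1).foldl (fun (st : Bool × PySem.Set (Int × Int)) r =>
        (PySem.List.pyRange 0 15 1).foldl (fun st c =>
          (if gapCell tiles r c then true else st.1,
           if !gapCell tiles r c then
             (if gapNeigh tiles r c [(-1, 0), (1, 0), (0, -1), (0, 1)] then
               PySem.Set.add st.2 (r, c) else st.2)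
           else st.2)) st) (false, anchors)
    if !st.1 && !is_first_play then PySem.Set.add st.2 (7, 7) else st.2

-- ===== PORT B =====
def gapFilled (tiles : List (List String)) : List (Int × Int) :=
  (PySem.List.pyRange 0 15 1).flatMap (fun r =>
    ((PySem.List.pyRange 0 15 1).filter (fun c => gapCell tiles r c)).map (fun c => (r, c)))

def gapNbrs (tiles : List (List String)) : PySem.Set (Int × Int) :=
  (gapFilled tiles).foldl (fun s p =>
    [(p.1 - 1, p.2), (p.1 + 1, p.2), (p.1, p.2 - 1), (p.1, p.2 + 1)].foldl
      (fun s q => if gapInb q then PySem.Set.add s q else s) s) PySem.Set.empty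

def get_anchor_points_alt (tiles : List (List String)) (is_first_play : Bool) : List (Int × Int) :=
  if is_first_play then PySem.Set.add PySem.Set.empty ((7 : Int), (7 : Int))
  else
    let filled := gapFilled tiles
    let nbrs := gapNbrs tiles
    let anchors :=
      (PySem.List.pyRange 0 15 1).foldl (fun (s : PySem.Set (Int × Int)) r =>
        (PySem.List.pyRange 0 15 1).foldl (fun s c =>
          if !gapCell tiles r c && PySem.Set.contains nbrs (r, c) then
            PySem.Set.add s (r, c) else s) s) PySem.Set.empty
    if filled = [] then PySem.Set.add anchors (7, 7) else anchors

-- ===== PRECONDITION & SPEC =====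
-- Pre_ excludes exactly the boards on which Python A raises IndexError: unless it is the
-- first play, A indexes tiles[r][c] for all 0 ≤ r, c < 15, so the first 15 rows must exist
-- and each have at least 15 entries.
def Pre_get_anchor_points (tiles : List (List String)) (is_first_play : Bool) : Prop :=
  is_first_play = true ∨ (15 ≤ tiles.length ∧ ∀ row ∈ tiles.take 15, 15 ≤ row.length)
instance (tiles : List (List String)) (is_first_play : Bool) : Decidable (Pre_get_anchor_points tiles is_first_play) := by unfold Pre_get_anchor_points; infer_instance

def pvWitness_get_anchor_points : List (List String) × Bool :=
  (List.replicate 15 (List.replicate 15 ""), false)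

def Spec_get_anchor_points (tiles : List (List String)) (is_first_play : Bool) (out : List (Int × Int)) : Prop := out = get_anchor_points_alt tiles is_first_play
instance (tiles : List (List String)) (is_first_play : Bool) (out : List (Int × Int)) : Decidable (Spec_get_anchor_points tiles is_first_play out) := by unfold Spec_get_anchor_points; infer_instance

-- ===== CLAIM (what is proved, stated in full; the proofs are below) =====
def Claim_equal_get_anchor_points : Prop := ∀ (tiles : List (List String)) (is_first_play : Bool), Dom_get_anchor_points tiles is_first_play → Pre_get_anchor_points tiles is_first_play → Spec_get_anchor_points tiles is_first_play (get_anchor_points tiles is_first_play)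

-- ===== LEMMAS AND PROOFS =====

-- a fold whose step acts componentwise splits into two folds
theorem gap_foldl_prod {α β γ : Type} (g : α → γ → α) (h : β → γ → β)
    (l : List γ) (a : α) (b : β) :
    l.foldl (fun st x => (g st.1 x, h st.2 x)) (a, b) = (l.foldl g a, l.foldl h b) := by
  induction l generalizing a b with
  | nil => rfl
  | cons x xs ih => simpa using ih (g a x) (h b x)

theorem gap_foldl_or {α : Type} (p : α → Bool) (l : List α) (b : Bool) :
    l.foldl (fun acc x => if p x then true else acc) b = (b || l.any p) := by
  induction l generalizing b with
  | nil => simp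
  | cons x xs ih =>
    simp only [List.foldl_cons, List.any_cons]
    by_cases h : p x = true
    · rw [if_pos h, ih, h]; simp
    · rw [if_neg h, ih]; simp [h]

theorem gap_foldl_or' {α : Type} (p : α → Bool) (l : List α) (b : Bool) :
    l.foldl (fun acc x => acc || p x) b = (b || l.any p) := by
  induction l generalizing b with
  | nil => simp
  | cons x xs ih => simp [ih, Bool.or_assoc]

theorem gap_mem_nstep (s : PySem.Set (Int × Int)) (q y : Int × Int) :
    y ∈ (if gapInb q then PySem.Set.add s q else s) ↔
      y ∈ s ∨ (gapInb y = true ∧ y = q) := by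
  split_ifs with h <;> simp [PySem.Set.mem_add]
  · constructor
    · rintro (hs | rfl)
      · exact Or.inl hs
      · exact Or.inr ⟨h, rfl⟩
    · rintro (hs | ⟨-, rfl⟩)
      · exact Or.inl hs
      · exact Or.inr rfl
  · rintro hi rfl; exact absurd hi h

theorem gap_mem_four (tiles : List (List String)) (s : PySem.Set (Int × Int))
    (p y : Int × Int) :
    y ∈ ([(p.1 - 1, p.2), (p.1 + 1, p.2), (p.1, p.2 - 1), (p.1, p.2 + 1)].foldl
          (fun s q => if gapInb q then PySem.Set.add s q else s) s) ↔
      y ∈ s ∨ (gapInb y = true ∧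
        (y = (p.1 - 1, p.2) ∨ y = (p.1 + 1, p.2) ∨ y = (p.1, p.2 - 1) ∨ y = (p.1, p.2 + 1))) := by
  simp only [List.foldl_cons, List.foldl_nil, gap_mem_nstep]
  tauto

theorem gap_mem_nbrs_aux (tiles : List (List String)) (l : List (Int × Int))
    (s : PySem.Set (Int × Int)) (y : Int × Int) :
    y ∈ l.foldl (fun s p =>
      [(p.1 - 1, p.2), (p.1 + 1, p.2), (p.1, p.2 - 1), (p.1, p.2 + 1)].foldl
        (fun s q => if gapInb q then PySem.Set.add s q else s) s) s ↔
      y ∈ s ∨ ∃ p ∈ l, gapInb y = true ∧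
        (y = (p.1 - 1, p.2) ∨ y = (p.1 + 1, p.2) ∨ y = (p.1, p.2 - 1) ∨ y = (p.1, p.2 + 1)) := by
  induction l generalizing s with
  | nil => simp
  | cons p ps ih =>
    rw [List.foldl_cons, ih, gap_mem_four tiles]
    simp only [List.mem_cons]
    constructor
    · rintro (((hs | h) ) | ⟨q, hq, hh⟩)
      · exact Or.inl hs
      · exact Or.inr ⟨p, Or.inl rfl, h⟩
      · exact Or.inr ⟨q, Or.inr hq, hh⟩
    · rintro (hs | ⟨q, (rfl | hq), hh⟩)
      · exact Or.inl (Or.inl hs)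
      · exact Or.inl (Or.inr hh)
      · exact Or.inr ⟨q, hq, hh⟩

theorem gap_mem_nbrs (tiles : List (List String)) (y : Int × Int) :
    y ∈ gapNbrs tiles ↔
      ∃ p ∈ gapFilled tiles, gapInb y = true ∧
        (y = (p.1 - 1, p.2) ∨ y = (p.1 + 1, p.2) ∨ y = (p.1, p.2 - 1) ∨ y = (p.1, p.2 + 1)) := by
  unfold gapNbrs
  rw [gap_mem_nbrs_aux tiles]
  simp [PySem.Set.empty]

theorem gap_mem_filled (tiles : List (List String)) (p : Int × Int) :
    p ∈ gapFilled tiles ↔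
      (0 ≤ p.1 ∧ p.1 < 15 ∧ 0 ≤ p.2 ∧ p.2 < 15 ∧ gapCell tiles p.1 p.2 = true) := by
  simp only [gapFilled, List.mem_flatMap, List.mem_map, List.mem_filter,
    PySem.List.mem_pyRange_one]
  constructor
  · rintro ⟨r, hr, c, ⟨hc, hcell⟩, rfl⟩; exact ⟨hr.1, hr.2, hc.1, hc.2, hcell⟩
  · rintro ⟨h1, h2, h3, h4, h5⟩
    exact ⟨p.1, ⟨h1, h2⟩, p.2, ⟨⟨h3, h4⟩, h5⟩, rfl⟩

theorem gap_neigh_nil (tiles : List (List String)) (r c : Int) :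
    gapNeigh tiles r c [] = false := rfl

theorem gapNeigh_cons (tiles : List (List String)) (r c dr dc : Int)
    (rest : List (Int × Int)) :
    gapNeigh tiles r c ((dr, dc) :: rest) = true ↔
      ((gapInb (r + dr, c + dc) = true ∧ gapCell tiles (r + dr) (c + dc) = true) ∨
        gapNeigh tiles r c rest = true) := by
  simp only [gapNeigh, Bool.and_eq_true]
  split_ifs with h
  · simp [h]
  · simp [h]

theorem gap_neigh_iff (tiles : List (List String)) (r c : Int)
    (hr : 0 ≤ r) (hr' : r < 15) (hc : 0 ≤ c) (hc' : c < 15) :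
    gapNeigh tiles r c [(-1, 0), (1, 0), (0, -1), (0, 1)] = true ↔
      PySem.Set.contains (gapNbrs tiles) (r, c) = true := by
  rw [PySem.Set.contains_iff, gap_mem_nbrs]
  simp only [gapNeigh_cons, gap_neigh_nil, Bool.false_eq_true, or_false]
  have hinb : gapInb (r, c) = true := by simp [gapInb]; omega
  constructor
  · rintro (⟨h1, h2⟩ | ⟨h1, h2⟩ | ⟨h1, h2⟩ | ⟨h1, h2⟩) <;> simp only [gapInb,
      Bool.and_eq_true, decide_eq_true_eq] at h1
    · refine ⟨(r + -1, c + 0), (gap_mem_filled _ _).mpr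
        ⟨by omega, by omega, by omega, by omega, h2⟩, hinb, ?_⟩
      right; left; rw [Prod.mk.injEq]; constructor <;> simp <;> omega
    · refine ⟨(r + 1, c + 0), (gap_mem_filled _ _).mpr
        ⟨by omega, by omega, by omega, by omega, h2⟩, hinb, ?_⟩
      left; rw [Prod.mk.injEq]; constructor <;> simp <;> omega
    · refine ⟨(r + 0, c + -1), (gap_mem_filled _ _).mpr
        ⟨by omega, by omega, by omega, by omega, h2⟩, hinb, ?_⟩
      right; right; right; rw [Prod.mk.injEq]; constructor <;> simp <;> omega
    · refine ⟨(r + 0, c + 1), (gap_mem_filled _ _).mpr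
        ⟨by omega, by omega, by omega, by omega, h2⟩, hinb, ?_⟩
      right; right; left; rw [Prod.mk.injEq]; constructor <;> simp <;> omega
  · rintro ⟨p, hp, -, (h | h | h | h)⟩ <;>
      rw [gap_mem_filled] at hp <;>
      obtain ⟨h1, h2, h3, h4, h5⟩ := hp <;>
      rw [Prod.mk.injEq] at h <;> obtain ⟨e1, e2⟩ := h
    · refine Or.inr (Or.inl ⟨?_, ?_⟩)
      · simp only [gapInb, Bool.and_eq_true, decide_eq_true_eq]; omega
      · have ha : r + 1 = p.1 := by omega
        have hb : c + 0 = p.2 := by omega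
        rw [ha, hb]; exact h5
    · refine Or.inl ⟨?_, ?_⟩
      · simp only [gapInb, Bool.and_eq_true, decide_eq_true_eq]; omega
      · have ha : r + -1 = p.1 := by omega
        have hb : c + 0 = p.2 := by omega
        rw [ha, hb]; exact h5
    · refine Or.inr (Or.inr (Or.inr ⟨?_, ?_⟩))
      · simp only [gapInb, Bool.and_eq_true, decide_eq_true_eq]; omega
      · have ha : r + 0 = p.1 := by omega
        have hb : c + 1 = p.2 := by omega
        rw [ha, hb]; exact h5
    · refine Or.inr (Or.inr (Or.inl ⟨?_, ?_⟩))
      · simp only [gapInb, Bool.and_eq_true, decide_eq_true_eq]; omega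
      · have ha : r + 0 = p.1 := by omega
        have hb : c + -1 = p.2 := by omega
        rw [ha, hb]; exact h5

theorem gap_any_iff (tiles : List (List String)) :
    ((PySem.List.pyRange 0 15 1).any (fun r =>
      (PySem.List.pyRange 0 15 1).any (fun c => gapCell tiles r c)) = true) ↔
      gapFilled tiles ≠ [] := by
  constructor
  · intro h hnil
    simp only [List.any_eq_true, PySem.List.mem_pyRange_one] at h
    obtain ⟨r, hr, c, hc, hcell⟩ := h
    rw [List.eq_nil_iff_forall_not_mem] at hnil
    exact hnil (r, c) ((gap_mem_filled _ _).mpr ⟨hr.1, hr.2, hc.1, hc.2, hcell⟩)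
  · intro hne
    obtain ⟨p, hp⟩ := List.exists_mem_of_ne_nil _ hne
    rw [gap_mem_filled] at hp
    obtain ⟨h1, h2, h3, h4, h5⟩ := hp
    simp only [List.any_eq_true, PySem.List.mem_pyRange_one]
    exact ⟨p.1, ⟨h1, h2⟩, p.2, ⟨h3, h4⟩, h5⟩

-- ===== VERDICT (by name: the statement is the Claim_ definition above) =====
theorem get_anchor_points_spec : Claim_equal_get_anchor_points := by
  intro tiles is_first_play _ _
  unfold Spec_get_anchor_points
  cases is_first_play with
  | true => rfl
  | false =>
    show get_anchor_points tiles false = get_anchor_points_alt tiles false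
    unfold get_anchor_points get_anchor_points_alt
    simp only [if_neg (by decide : ¬ (false = true))]
    -- split A's paired fold into the has_tiles fold and the anchors fold
    rw [show (fun (st : Bool × PySem.Set (Int × Int)) r =>
          (PySem.List.pyRange 0 15 1).foldl (fun st c =>
            (if gapCell tiles r c then true else st.1,
             if !gapCell tiles r c then
               (if gapNeigh tiles r c [(-1, 0), (1, 0), (0, -1), (0, 1)] then
                 PySem.Set.add st.2 (r, c) else st.2)
             else st.2)) st)
        = (fun (st : Bool × PySem.Set (Int × Int)) r =>
            ((PySem.List.pyRange 0 15 1).foldl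
               (fun b c => if gapCell tiles r c then true else b) st.1,
             (PySem.List.pyRange 0 15 1).foldl
               (fun s c =>
                 if !gapCell tiles r c then
                   (if gapNeigh tiles r c [(-1, 0), (1, 0), (0, -1), (0, 1)] then
                     PySem.Set.add s (r, c) else s)
                 else s) st.2)) from by
      funext st r
      obtain ⟨a, b⟩ := st
      exact gap_foldl_prod
        (fun b c => if gapCell tiles r c = true then true else b)
        (fun s c =>
          if (!gapCell tiles r c) = true then
            if gapNeigh tiles r c [(-1, 0), (1, 0), (0, -1), (0, 1)] = true then
              PySem.Set.add s (r, c) else s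
          else s)
        (PySem.List.pyRange 0 15 1) a b]
    rw [gap_foldl_prod
      (fun a r => List.foldl (fun b c => if gapCell tiles r c = true then true else b) a
        (PySem.List.pyRange 0 15 1))
      (fun s r => List.foldl (fun s c =>
          if (!gapCell tiles r c) = true then
            if gapNeigh tiles r c [(-1, 0), (1, 0), (0, -1), (0, 1)] = true then
              PySem.Set.add s (r, c) else s
          else s) s (PySem.List.pyRange 0 15 1))
      (PySem.List.pyRange 0 15 1) false PySem.Set.empty]
    -- the has_tiles component is the nested any
    have hht : (PySem.List.pyRange 0 15 1).foldl
        (fun b r => (PySem.List.pyRange 0 15 1).foldl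
          (fun b c => if gapCell tiles r c then true else b) b) false
        = (PySem.List.pyRange 0 15 1).any (fun r =>
            (PySem.List.pyRange 0 15 1).any (fun c => gapCell tiles r c)) := by
      have : ∀ b, (PySem.List.pyRange 0 15 1).foldl
          (fun b r => (PySem.List.pyRange 0 15 1).foldl
            (fun b c => if gapCell tiles r c then true else b) b) b
          = (b || (PySem.List.pyRange 0 15 1).any (fun r =>
              (PySem.List.pyRange 0 15 1).any (fun c => gapCell tiles r c))) := by
        intro b
        rw [show (fun b r => (PySem.List.pyRange 0 15 1).foldl
              (fun b c => if gapCell tiles r c then true else b) b)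
            = (fun b r => b || (PySem.List.pyRange 0 15 1).any
                  (fun c => gapCell tiles r c)) from by
          funext b r; exact gap_foldl_or _ _ b]
        exact gap_foldl_or' _ _ b
      simpa using this false
    rw [hht]
    -- the anchors folds agree pointwise on the grid
    have hanc : (PySem.List.pyRange 0 15 1).foldl
        (fun s r => (PySem.List.pyRange 0 15 1).foldl
          (fun s c =>
            if !gapCell tiles r c then
              (if gapNeigh tiles r c [(-1, 0), (1, 0), (0, -1), (0, 1)] then
                PySem.Set.add s (r, c) else s)
            else s) s) PySem.Set.empty
        = (PySem.List.pyRange 0 15 1).foldl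
            (fun s r => (PySem.List.pyRange 0 15 1).foldl
              (fun s c =>
                if !gapCell tiles r c && PySem.Set.contains (gapNbrs tiles) (r, c) then
                  PySem.Set.add s (r, c) else s) s) PySem.Set.empty := by
      apply PySem.List.foldl_congr_mem
      intro s r hr
      apply PySem.List.foldl_congr_mem
      intro s c hc
      rw [PySem.List.mem_pyRange_one] at hr hc
      by_cases hcell : gapCell tiles r c = true
      · simp [hcell]
      · simp only [Bool.not_eq_true] at hcell
        simp only [hcell, Bool.not_false, if_pos, Bool.true_and]
        by_cases hn : gapNeigh tiles r c [(-1, 0), (1, 0), (0, -1), (0, 1)] = true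
        · rw [if_pos hn,
            if_pos ((gap_neigh_iff tiles r c hr.1 hr.2 hc.1 hc.2).mp hn)]
        · rw [if_neg hn, if_neg (fun hcon => hn
            ((gap_neigh_iff tiles r c hr.1 hr.2 hc.1 hc.2).mpr hcon))]
    rw [hanc]
    -- empty-board fallback: has_tiles = false iff the filled list is empty
    by_cases hf : gapFilled tiles = []
    · rw [if_pos hf]
      have hany : (PySem.List.pyRange 0 15 1).any (fun r =>
          (PySem.List.pyRange 0 15 1).any (fun c => gapCell tiles r c)) = false := by
        rw [← Bool.not_eq_true, gap_any_iff]
        simp [hf]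
      rw [hany]
      simp
    · rw [if_neg hf]
      have hany := (gap_any_iff tiles).mpr hf
      rw [hany]
      simp
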